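-- pv_equiv track=rewrite | github.com/Cristopher811/Computational_physics | problems/CH_1_2_circular2.py | get_circular_permutations
-- ===== SOURCE A (Python) =====
-- def get_circular_permutations(number):
--     number_str = str(number)
--     length = len(number_str)
--     circular_permutations = []
--
--     for i in range(length):
--         permutation = int(number_str[i:] + number_str[:i])
--         circular_permutations.append(permutation)
--
--     return circular_permutations
-- ===== SOURCE B (Python) =====
-- def get_circular_permutations(number):
--     n = len(str(number))
--     p = 10 ** (n - 1)
--     circular_permutations = []
--     val = number
--     for _ in range(n):
--         circular_permutations.append(val)
--         val = (val % p) * 10 + val // p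
--     return circular_permutations
-- ===== Notes on version B (the rewrite author's own statement) =====
-- stated objective: alternative
-- what changed: Each rotation is derived arithmetically from the previous value, moving the leading digit to the low end via divmod by ten to the power n-1, instead of re-slicing the decimal string and re-parsing it with int() for every index; Pre_ excludes negative numbers, on which A raises ValueError (the minus sign ends up inside the rotated digit string).
import Mathlib
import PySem

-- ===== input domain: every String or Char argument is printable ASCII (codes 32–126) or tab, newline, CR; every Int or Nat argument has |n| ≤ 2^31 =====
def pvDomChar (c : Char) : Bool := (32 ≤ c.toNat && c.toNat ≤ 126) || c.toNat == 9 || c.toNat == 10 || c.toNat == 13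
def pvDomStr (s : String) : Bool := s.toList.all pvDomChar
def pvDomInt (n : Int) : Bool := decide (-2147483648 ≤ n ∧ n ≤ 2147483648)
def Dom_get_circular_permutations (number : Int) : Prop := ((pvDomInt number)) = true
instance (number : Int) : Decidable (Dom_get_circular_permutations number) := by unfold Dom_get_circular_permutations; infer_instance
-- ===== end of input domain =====

-- B derives each rotation arithmetically from the previous value instead of re-slicing and
-- re-parsing the decimal string; equivalence is proved for all non-negative numbers (on
-- negative input Python's A raises ValueError, so those inputs lie outside Pre_).

-- ===== PORT A =====
-- int(...) never raises inside Pre_ (the sliced string is a non-empty digit string);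
-- `.getD 0` only names Python's unreachable ValueError branch.
def get_circular_permutations (number : Int) : List Int :=
  let number_str := PySem.Int.toStr number
  let length := PySem.Str.len number_str
  (PySem.List.pyRange 0 length 1).foldl
    (fun circular_permutations i =>
      let permutation :=
        (PySem.Int.ofStr? (PySem.Str.slice number_str (some i) none ++
                           PySem.Str.slice number_str none (some i))).getD 0
      circular_permutations ++ [permutation]) []

-- ===== PORT B =====
def get_circular_permutations_alt (number : Int) : List Int :=
  let n := PySem.Str.len (PySem.Int.toStr number)
  let p : Int := 10 ^ (n - 1).toNat
  ((PySem.List.pyRange 0 n 1).foldl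
    (fun st _ => (st.1 ++ [st.2], PySem.Int.mod st.2 p * 10 + PySem.Int.floordiv st.2 p))
    (([] : List Int), number)).1

-- ===== PRECONDITION & SPEC =====
-- Pre_ excludes negative numbers: there str(number) contains '-', the rotations move it into
-- the middle/end of the string and int() raises ValueError (already at i = 1).
def Pre_get_circular_permutations (number : Int) : Prop := 0 ≤ number
instance (number : Int) : Decidable (Pre_get_circular_permutations number) := by
  unfold Pre_get_circular_permutations; infer_instance

def pvWitness_get_circular_permutations : Int := 100

def Spec_get_circular_permutations (number : Int) (out : List Int) : Prop :=
  out = get_circular_permutations_alt number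
instance (number : Int) (out : List Int) : Decidable (Spec_get_circular_permutations number out) := by
  unfold Spec_get_circular_permutations; infer_instance

-- ===== CLAIM (what is proved, stated in full; the proofs are below) =====
def Claim_equal_get_circular_permutations : Prop :=
  ∀ (number : Int), Dom_get_circular_permutations number →
    Pre_get_circular_permutations number →
      Spec_get_circular_permutations number (get_circular_permutations number)

-- ===== LEMMAS AND PROOFS =====

-- decimal value of a digit string, Python's left-to-right accumulator
def pvDval (acc : ℕ) (l : List Char) : ℕ :=
  l.foldl (fun a c => a * 10 + (c.toNat - 48)) acc

theorem pvDval_append1 (acc : ℕ) (l : List Char) (c : Char) :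
    pvDval acc (l ++ [c]) = pvDval acc l * 10 + (c.toNat - 48) := by
  simp [pvDval]

theorem pv_digit_bounds (c : Char) (h : c.isDigit = true) :
    48 ≤ c.toNat ∧ c.toNat ≤ 57 := by
  simp only [Char.isDigit, Bool.and_eq_true, decide_eq_true_eq] at h
  have h1 : ('0').val.toNat ≤ c.val.toNat := UInt32.le_iff_toNat_le.mp h.1
  have h2 : c.val.toNat ≤ ('9').val.toNat := UInt32.le_iff_toNat_le.mp h.2
  exact ⟨h1, h2⟩

theorem pvDval_acc (l : List Char) : ∀ acc : ℕ,
    pvDval acc l = acc * 10 ^ l.length + pvDval 0 l := by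
  induction l with
  | nil => simp [pvDval]
  | cons c t ih =>
    intro acc
    show pvDval (acc * 10 + (c.toNat - 48)) t = _
    have h0 : pvDval 0 (c :: t) = pvDval (0 * 10 + (c.toNat - 48)) t := rfl
    rw [ih, h0, ih (0 * 10 + (c.toNat - 48))]
    simp only [List.length_cons, pow_succ]
    ring

theorem pvDval_lt (l : List Char) (h : ∀ c ∈ l, c.isDigit = true) :
    pvDval 0 l < 10 ^ l.length := by
  induction l with
  | nil => simp [pvDval]
  | cons c t ih =>
    have hd : c.toNat - 48 ≤ 9 := by
      have := pv_digit_bounds c (h c (List.mem_cons_self ..))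
      omega
    show pvDval (0 * 10 + (c.toNat - 48)) t < _
    rw [pvDval_acc]
    have ht := ih (fun x hx => h x (List.mem_cons_of_mem _ hx))
    have hX : (0 * 10 + (c.toNat - 48)) * 10 ^ t.length ≤ 9 * 10 ^ t.length :=
      Nat.mul_le_mul_right _ (by omega)
    simp only [List.length_cons, pow_succ]
    omega

theorem pv_digit_not_space (c : Char) (h : c.isDigit = true) :
    PySem.Int.isIntSpace c = false := by
  simp only [PySem.Int.isIntSpace, Bool.or_eq_false_iff, decide_eq_false_iff_not]
  refine ⟨⟨⟨⟨⟨?_, ?_⟩, ?_⟩, ?_⟩, ?_⟩, ?_⟩ <;>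
    (intro he; subst he; exact absurd h (by decide))

theorem pv_dropWhile_space_digits (l : List Char) (h : ∀ c ∈ l, c.isDigit = true) :
    l.dropWhile PySem.Int.isIntSpace = l := by
  cases l with
  | nil => rfl
  | cons c t =>
    rw [List.dropWhile_cons_of_neg]
    simp [pv_digit_not_space c (h c (List.mem_cons_self ..))]

-- run of the (captured) digit loop of int(): accumulating state `afterDigit = true`
theorem pv_g_run (g : List Char → Bool → ℕ → Option ℕ)
    (hnil : ∀ b acc, g [] b acc = if b = true then some acc else none)
    (hcons : ∀ c rest b acc, g (c :: rest) b acc =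
      if c.isDigit = true then g rest true (acc * 10 + (c.toNat - '0'.toNat))
      else if c = '_' ∧ b = true then
        (match rest with
         | d :: _ => if d.isDigit = true then g rest false acc else none
         | [] => none)
      else none) :
    ∀ (ds : List Char), (∀ c ∈ ds, c.isDigit = true) → ∀ acc,
      g ds true acc = some (pvDval acc ds) := by
  intro ds
  induction ds with
  | nil => intro _ acc; rw [hnil]; rfl
  | cons c t ih =>
    intro h acc
    rw [hcons, if_pos (h c (List.mem_cons_self ..))]
    exact ih (fun x hx => h x (List.mem_cons_of_mem _ hx)) _

-- captured form of PySem.Int.ofChars? (its digit loop is private: g, v are bound by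
-- unification in pv_parse_digits below, their defining equations discharged by rfl)
theorem pv_parse_digits_core (g : List Char → Bool → ℕ → Option ℕ)
    (v : List Char → Option ℕ)
    (hnil : ∀ b acc, g [] b acc = if b = true then some acc else none)
    (hcons : ∀ c rest b acc, g (c :: rest) b acc =
      if c.isDigit = true then g rest true (acc * 10 + (c.toNat - '0'.toNat))
      else if c = '_' ∧ b = true then
        (match rest with
         | d :: _ => if d.isDigit = true then g rest false acc else none
         | [] => none)
      else none)
    (hv : ∀ cs, v cs = match cs with | [] => none | l => g l false 0)
    (hOf : ∀ s : List Char, PySem.Int.ofChars? s =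
      (match (List.dropWhile PySem.Int.isIntSpace
                (List.dropWhile PySem.Int.isIntSpace s).reverse).reverse with
       | '-' :: ds => Option.map (fun n => -n) (do let a ← v ds; pure (a : Int))
       | '+' :: ds => Option.map (fun n => n) (do let a ← v ds; pure (a : Int))
       | ds => Option.map (fun n => n) (do let a ← v ds; pure (a : Int)))) :
    ∀ cs : List Char, cs ≠ [] → (∀ c ∈ cs, c.isDigit = true) →
      PySem.Int.ofChars? cs = some ((pvDval 0 cs : ℕ) : ℤ) := by
  intro cs hne hdig
  rw [hOf]
  have hrev : ∀ c ∈ cs.reverse, c.isDigit = true := by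
    intro c hc; exact hdig c (List.mem_reverse.mp hc)
  rw [pv_dropWhile_space_digits cs hdig, pv_dropWhile_space_digits _ hrev,
      List.reverse_reverse]
  obtain ⟨c, t, rfl⟩ := List.exists_cons_of_ne_nil hne
  have hc : c.isDigit = true := hdig c (List.mem_cons_self ..)
  have hcm : c ≠ '-' ∧ c ≠ '+' := by
    constructor <;> (intro he; subst he; exact absurd hc (by decide))
  split
  · next ds heq => injection heq with h1 _; exact absurd h1 hcm.1
  · next ds heq => injection heq with h1 _; exact absurd h1 hcm.2
  · rw [hv]
    simp only []
    rw [hcons, if_pos hc,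
        pv_g_run g hnil hcons t (fun x hx => hdig x (List.mem_cons_of_mem _ hx)) _]
    rfl

theorem pv_parse_digits (cs : List Char) (hne : cs ≠ [])
    (hdig : ∀ c ∈ cs, c.isDigit = true) :
    PySem.Int.ofChars? cs = some ((pvDval 0 cs : ℕ) : ℤ) := by
  refine pv_parse_digits_core ?g ?v ?hnil ?hcons ?hv ?hOf cs hne hdig
  case hOf => intro s; rfl
  case hv => intro l; rfl
  case hcons => intro c rest b acc; rfl
  case hnil => intro b acc; rfl

theorem pv_dval_toDigits (m : ℕ) : pvDval 0 (Nat.toDigits 10 m) = m := by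
  induction m using Nat.strong_induction_on with
  | _ m ih =>
    rw [Nat.toDigits_eq_if (by norm_num)]
    by_cases hm : m < 10
    · simp only [if_pos hm]
      interval_cases m <;> decide
    · rw [if_neg hm, pvDval_append1, ih (m / 10) (by omega)]
      have h9 : m % 10 < 10 := Nat.mod_lt _ (by norm_num)
      have : (m % 10).digitChar.toNat - 48 = m % 10 := by
        set r := m % 10 with hr
        interval_cases r <;> decide
      omega

-- one arithmetic rotation step = one cyclic shift of the digit string
theorem pv_rot_step (ds : List Char) (hdig : ∀ c ∈ ds, c.isDigit = true)
    (k : ℕ) (hk : k < ds.length) :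
    pvDval 0 (ds.drop (k + 1) ++ ds.take (k + 1)) =
      pvDval 0 (ds.drop k ++ ds.take k) % 10 ^ (ds.length - 1) * 10 +
        pvDval 0 (ds.drop k ++ ds.take k) / 10 ^ (ds.length - 1) := by
  have hdrop : ds.drop k = ds[k] :: ds.drop (k + 1) := List.drop_eq_getElem_cons hk
  have htake : ds.take (k + 1) = ds.take k ++ [ds[k]] := by
    rw [← List.concat_eq_append, List.take_concat_get]
  set t := ds.drop (k + 1) ++ ds.take k with ht
  have hlt : t.length = ds.length - 1 := by
    simp only [ht, List.length_append, List.length_drop, List.length_take]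
    omega
  have htd : ∀ c ∈ t, c.isDigit = true := by
    intro c hc
    rcases List.mem_append.mp hc with h | h
    · exact hdig c (List.mem_of_mem_drop h)
    · exact hdig c (List.mem_of_mem_take h)
  have hrot1 : ds.drop (k + 1) ++ ds.take (k + 1) = t ++ [ds[k]] := by
    rw [htake, ht, ← List.append_assoc]
  have hrot0 : ds.drop k ++ ds.take k = ds[k] :: t := by
    rw [hdrop, ht, List.cons_append]
  have hcons : pvDval 0 (ds[k] :: t) =
      (ds[k].toNat - 48) * 10 ^ (ds.length - 1) + pvDval 0 t := by
    show pvDval (0 * 10 + (ds[k].toNat - 48)) t = _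
    rw [pvDval_acc, hlt]
    ring_nf
  have hbP : pvDval 0 t < 10 ^ (ds.length - 1) := hlt ▸ pvDval_lt t htd
  have hPpos : 0 < 10 ^ (ds.length - 1) := pow_pos (by norm_num : (0:ℕ) < 10) _
  rw [hrot1, hrot0, pvDval_append1, hcons]
  have hmod : ((ds[k].toNat - 48) * 10 ^ (ds.length - 1) + pvDval 0 t) % 10 ^ (ds.length - 1)
      = pvDval 0 t := by
    rw [mul_comm, Nat.mul_add_mod, Nat.mod_eq_of_lt hbP]
  have hdiv : ((ds[k].toNat - 48) * 10 ^ (ds.length - 1) + pvDval 0 t) / 10 ^ (ds.length - 1)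
      = ds[k].toNat - 48 := by
    rw [mul_comm, Nat.mul_add_div hPpos, Nat.div_eq_of_lt hbP, add_zero]
  rw [hmod, hdiv]


-- the i-th element A appends: parse of the i-rotated digit string
theorem pv_A_elem (number : Int) (h0 : 0 ≤ number) (k : ℕ)
    (hk : k < (Nat.toDigits 10 number.toNat).length) :
    (PySem.Int.ofStr? (PySem.Str.slice (PySem.Int.toStr number) (some (k : ℕ)) none ++
        PySem.Str.slice (PySem.Int.toStr number) none (some (k : ℕ)))).getD 0 =
      ((pvDval 0 ((Nat.toDigits 10 number.toNat).drop k ++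
        (Nat.toDigits 10 number.toNat).take k) : ℕ) : ℤ) := by
  have hds : (PySem.Int.toStr number).toList = Nat.toDigits 10 number.toNat := by
    rw [PySem.Int.toList_toStr]
    simp [PySem.Int.toChars, not_lt.mpr h0]
  rw [PySem.Int.ofStr?.eq_1]
  have harg : (PySem.Str.slice (PySem.Int.toStr number) (some (k : ℕ)) none ++
      PySem.Str.slice (PySem.Int.toStr number) none (some (k : ℕ))).toList =
      (Nat.toDigits 10 number.toNat).drop k ++ (Nat.toDigits 10 number.toNat).take k := by
    rw [String.toList_append, PySem.Str.toList_slice, PySem.Str.toList_slice, hds,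
        PySem.Chars.slice_eq_listSlice, PySem.Chars.slice_eq_listSlice,
        PySem.List.slice_from_natCast, PySem.List.slice_to_natCast]
  rw [harg]
  have hne : (Nat.toDigits 10 number.toNat).drop k ++
      (Nat.toDigits 10 number.toNat).take k ≠ [] := by
    have : ((Nat.toDigits 10 number.toNat).drop k).length ≠ 0 := by
      rw [List.length_drop]; omega
    intro he
    rcases List.append_eq_nil_iff.mp he with ⟨h1, _⟩
    exact this (by rw [h1]; rfl)
  have hdig : ∀ c ∈ (Nat.toDigits 10 number.toNat).drop k ++
      (Nat.toDigits 10 number.toNat).take k, c.isDigit = true := by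
    intro c hc
    have : c ∈ Nat.toDigits 10 number.toNat := by
      rcases List.mem_append.mp hc with h | h
      · exact List.mem_of_mem_drop h
      · exact List.mem_of_mem_take h
    exact Nat.isDigit_of_mem_toDigits (by norm_num) (by norm_num) this
  rw [pv_parse_digits _ hne hdig]
  rfl

-- B's loop, generalized: the first component collects the iterates of the step function
theorem pv_pairfold (p : Int) (l : List Int) : ∀ (acc : List Int) (v : Int),
    (l.foldl (fun st _ => (st.1 ++ [st.2],
        PySem.Int.mod st.2 p * 10 + PySem.Int.floordiv st.2 p)) (acc, v)).1 =
      acc ++ (List.range l.length).map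
        (fun j => (fun w => PySem.Int.mod w p * 10 + PySem.Int.floordiv w p)^[j] v) := by
  induction l with
  | nil => intro acc v; simp
  | cons x t ih =>
    intro acc v
    rw [List.foldl_cons, ih]
    rw [List.length_cons, List.range_succ_eq_map, List.map_cons, List.map_map,
        ← List.append_cons]
    simp only [Function.iterate_zero, id_eq]
    congr 2

-- the k-th iterate of B's arithmetic step is the value of the k-rotated digit string
theorem pv_iter_val (number : Int) (h0 : 0 ≤ number) (k : ℕ)
    (hk : k < (Nat.toDigits 10 number.toNat).length) :
    (fun w => PySem.Int.mod w ((10 ^ ((Nat.toDigits 10 number.toNat).length - 1) : ℕ) : ℤ) * 10 +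
        PySem.Int.floordiv w ((10 ^ ((Nat.toDigits 10 number.toNat).length - 1) : ℕ) : ℤ))^[k] number =
      ((pvDval 0 ((Nat.toDigits 10 number.toNat).drop k ++
        (Nat.toDigits 10 number.toNat).take k) : ℕ) : ℤ) := by
  induction k with
  | zero =>
    simp only [Function.iterate_zero, id_eq, List.drop_zero, List.take_zero, List.append_nil]
    rw [pv_dval_toDigits, Int.toNat_of_nonneg h0]
  | succ k ih =>
    have hk' : k < (Nat.toDigits 10 number.toNat).length := by omega
    rw [Function.iterate_succ_apply', ih hk']
    simp only [PySem.Int.mod_natCast, PySem.Int.floordiv_natCast]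
    have hdig : ∀ c ∈ Nat.toDigits 10 number.toNat, c.isDigit = true :=
      fun c hc => Nat.isDigit_of_mem_toDigits (by norm_num) (by norm_num) hc
    rw [pv_rot_step _ hdig k hk']
    push_cast
    ring

-- ===== VERDICT (by name: the statement is the Claim_ definition above) =====
theorem get_circular_permutations_spec : Claim_equal_get_circular_permutations := by
  intro number _ hpre
  unfold Spec_get_circular_permutations
  unfold get_circular_permutations get_circular_permutations_alt
  have hpre' : (0:Int) ≤ number := hpre
  have hds : (PySem.Int.toStr number).toList = Nat.toDigits 10 number.toNat := by
    rw [PySem.Int.toList_toStr]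
    simp [PySem.Int.toChars, not_lt.mpr hpre']
  have hlen : PySem.Str.len (PySem.Int.toStr number) =
      ((Nat.toDigits 10 number.toNat).length : ℤ) := by
    rw [PySem.Str.len_eq, hds]
  set n := (Nat.toDigits 10 number.toNat).length with hn
  have hnpos : 0 < n := Nat.length_toDigits_pos
  simp only [hlen]
  -- A side: append-singleton loop is a map over the range
  rw [PySem.List.foldl_append_singleton_eq_map, PySem.List.pyRange_one, List.map_map]
  -- B side: the pair fold collects iterates
  rw [pv_pairfold]
  simp only [List.length_map, List.length_range, List.nil_append, sub_zero,
    Int.toNat_natCast]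
  -- exponent of B's modulus
  have hp : ((10:ℤ) ^ (((n:ℤ) - 1)).toNat) = ((10 ^ (n - 1) : ℕ) : ℤ) := by
    have : (((n:ℤ) - 1)).toNat = n - 1 := by omega
    rw [this]; push_cast; ring
  rw [hp]
  apply List.map_congr_left
  intro k hkm
  have hk : k < n := List.mem_range.mp hkm
  simp only [Function.comp_apply, zero_add]
  rw [pv_A_elem number hpre' k hk, pv_iter_val number hpre' k hk]
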